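-- pv_equiv track=rewrite | github.com/markmightknow/wordle_worst_case_analysis | wordle_tools.py | check_partitions
-- ===== SOURCE A (Python) =====
-- def wordl_score(guess, solution):
--
--     res = [0, 0, 0, 0, 0]
--
--     for i, letter in enumerate(solution):
--         if guess[i] == letter:
--             res[i] = 2
--         else:
--             for j, guessed_letter in enumerate(guess):
--                 if guessed_letter == letter:
--                     if res[j] == 0:
--                         res[j] = 1
--                         break
--     return tuple(res)
--
-- def check_partitions(q_key, sieve_words):
--
--     x = [
--             tuple(
--                 wordl_score(q_word, w)
--                 for q_word in q_key
--             )
--             for w in sieve_words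
--         ]
--     return len(x) == len(set(x))
-- ===== SOURCE B (Python) =====
-- def wordl_score(guess, solution):
--     res = [0, 0, 0, 0, 0]
--     for i, letter in enumerate(solution):
--         if guess[i] == letter:
--             res[i] = 2
--         else:
--             j = next((k for k, g in enumerate(guess) if g == letter and res[k] == 0), None)
--             if j is not None:
--                 res[j] = 1
--     return tuple(res)
--
--
-- def check_partitions(q_key, sieve_words):
--     # Sort the score-tuple rows, then any duplicate must be adjacent:
--     # certify distinctness by one adjacent-pair scan instead of a hash set.
--     rows = sorted(tuple(wordl_score(q_word, w) for q_word in q_key) for w in sieve_words)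
--     for a, b in zip(rows, rows[1:]):
--         if a == b:
--             return False
--     return True
-- ===== Notes on version B (the rewrite author's own statement) =====
-- stated objective: alternative
-- what changed: Distinctness of the score-tuple rows is decided by sorting them and scanning adjacent pairs for an equal neighbour (early exit) instead of comparing the list's length with a hash set's; wordl_score's inner search is a single first-match lookup (next over a generator) instead of an explicit break loop.
-- outside the precondition, e.g. on check_partitions(['abcdef'], ['a']): A returns True, B returns True
import Mathlib
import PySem

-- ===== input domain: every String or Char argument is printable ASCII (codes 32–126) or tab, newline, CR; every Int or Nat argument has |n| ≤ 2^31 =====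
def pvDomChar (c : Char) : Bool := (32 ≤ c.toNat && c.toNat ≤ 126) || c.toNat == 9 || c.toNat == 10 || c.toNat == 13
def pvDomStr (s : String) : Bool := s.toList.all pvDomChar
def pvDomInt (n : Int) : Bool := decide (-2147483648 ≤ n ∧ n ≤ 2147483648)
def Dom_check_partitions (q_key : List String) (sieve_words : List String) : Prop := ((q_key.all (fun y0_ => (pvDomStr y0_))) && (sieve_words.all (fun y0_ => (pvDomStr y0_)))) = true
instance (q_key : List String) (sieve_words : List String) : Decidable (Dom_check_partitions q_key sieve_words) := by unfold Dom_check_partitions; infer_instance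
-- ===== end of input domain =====

-- B sorts the score-tuple rows and scans adjacent pairs for a duplicate (early exit) instead of A's hash-set size comparison, and finds the inner 1-slot by a single first-match lookup; exactly equivalent on Pre_ (alternative algorithm, no speed claim).


-- ===== PORT A =====
-- a score is Python's 5-tuple of ints
abbrev PvScore : Type := Int × Int × Int × Int × Int
abbrev PvRow : Type := List PvScore

-- inner loop 'for j, guessed_letter in enumerate(guess): …'; res[j]? = none exactly where Python's res[j] raises IndexError
def wsInner (letter : Char) : Nat → List Char → List Int → Option (List Int)
  | _, [], res => some res
  | j, gl :: rest, res =>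
    if gl = letter then
      match res[j]? with
      | none => none
      | some v => if v = 0 then some (res.set j 1) else wsInner letter (j+1) rest res
    else wsInner letter (j+1) rest res

-- outer loop 'for i, letter in enumerate(solution): …'; guess[i]? / res[i]? = none exactly where Python raises IndexError
def wsOuter (guess : List Char) : Nat → List Char → List Int → Option (List Int)
  | _, [], res => some res
  | i, letter :: rest, res =>
    match guess[i]? with
    | none => none
    | some gi =>
      if gi = letter then
        match res[i]? with
        | none => none
        | some _ => wsOuter guess (i+1) rest (res.set i 2)
      else
        match wsInner letter 0 guess res with
        | none => none
        | some res' => wsOuter guess (i+1) rest res'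

def wordl_score (guess : String) (solution : String) : Option PvScore :=
  match wsOuter guess.toList 0 solution.toList [0, 0, 0, 0, 0] with
  | some [a, b, c, d, e] => some (a, b, c, d, e)
  | _ => none   -- res always has length 5, so only the none case of wsOuter lands here

-- x = [tuple(wordl_score(q_word, w) for q_word in q_key) for w in sieve_words]
def scoreRow (q_key : List String) (w : String) : Option PvRow :=
  q_key.mapM (fun g => wordl_score g w)

def buildX (q_key : List String) (sieve_words : List String) : Option (List PvRow) :=
  sieve_words.mapM (fun w => scoreRow q_key w)

def check_partitions (q_key : List String) (sieve_words : List String) : Bool :=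
  match buildX q_key sieve_words with
  | none => false   -- unreachable under Pre_: Python raises IndexError here
  | some x => decide (x.length = (PySem.Set.ofList x).length)

-- ===== PORT B =====
-- B's wordl_score: 'j = next((k for k, g in enumerate(guess) if g == letter and res[k] == 0), None)'
-- findZeroSlot walks enumerate(guess) once; outer none = IndexError (res[k] out of range in the condition),
-- some none = the generator is exhausted (j is None), some (some k) = the first hit.
def findZeroSlot (letter : Char) (res : List Int) : List (Char × Nat) → Option (Option Nat)
  | [] => some none
  | (g, k) :: rest =>
    if g = letter then
      match res[k]? with
      | none => none
      | some v => if v = 0 then some (some k) else findZeroSlot letter res rest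
    else findZeroSlot letter res rest

-- one iteration of B's 'for i, letter in enumerate(solution)' body, res threaded through foldlM
def scoreStep (guess : List Char) (res : List Int) (p : Char × Nat) : Option (List Int) :=
  match guess[p.2]? with
  | none => none   -- guess[i] raises IndexError
  | some gi =>
    if gi = p.1 then
      if p.2 < res.length then some (res.set p.2 2) else none   -- 'res[i] = 2'
    else
      match findZeroSlot p.1 res guess.zipIdx with
      | none => none
      | some none => some res                   -- j is None: no write
      | some (some j) => some (res.set j 1)     -- 'res[j] = 1' (j in range: the condition read res[j])

def wordl_score_b (guess : String) (solution : String) : Option PvScore :=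
  match solution.toList.zipIdx.foldlM (scoreStep guess.toList) [0, 0, 0, 0, 0] with
  | some [a, b, c, d, e] => some (a, b, c, d, e)
  | _ => none

-- Python compares tuples of int-5-tuples lexicographically; that is exactly the
-- lexicographic order on List (List Int) under this injective flattening key.
def pvToL (r : PvRow) : List (List Int) :=
  r.map (fun t => [t.1, t.2.1, t.2.2.1, t.2.2.2.1, t.2.2.2.2])

-- 'for a, b in zip(rows, rows[1:]): if a == b: return False' then 'return True'
def adjDistinct : List PvRow → Bool
  | [] => true
  | [_] => true
  | a :: b :: t => if a = b then false else adjDistinct (b :: t)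

def check_partitions_alt (q_key : List String) (sieve_words : List String) : Bool :=
  match sieve_words.mapM (fun w => q_key.mapM (fun g => wordl_score_b g w)) with
  | none => false   -- unreachable under Pre_: Python raises IndexError here
  | some rows => adjDistinct (PySem.List.sorted rows pvToL false)

-- ===== PRECONDITION & SPEC =====
-- Pre_ excludes inputs on which wordl_score raises IndexError (a nonempty sieve word longer
-- than some key word, or a word longer than res's 5 slots); the bound is slightly
-- conservative: a few inputs with key words longer than 5 on which A still returns are excluded too.
def Pre_check_partitions (q_key : List String) (sieve_words : List String) : Prop :=
  ∀ w ∈ sieve_words, ∀ g ∈ q_key,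
    PySem.Str.len w = 0 ∨ (PySem.Str.len w ≤ PySem.Str.len g ∧ PySem.Str.len g ≤ 5)
instance (q_key : List String) (sieve_words : List String) : Decidable (Pre_check_partitions q_key sieve_words) := by unfold Pre_check_partitions; infer_instance

def pvWitness_check_partitions : List String × List String :=
  (["crane", "slate"], ["abcde", "fghij"])

def Spec_check_partitions (q_key : List String) (sieve_words : List String) (out : Bool) : Prop := out = check_partitions_alt q_key sieve_words
instance (q_key : List String) (sieve_words : List String) (out : Bool) : Decidable (Spec_check_partitions q_key sieve_words out) := by unfold Spec_check_partitions; infer_instance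

-- ===== CLAIM (what is proved, stated in full; the proofs are below) =====
def Claim_equal_check_partitions : Prop := ∀ (q_key : List String) (sieve_words : List String), Dom_check_partitions q_key sieve_words → Pre_check_partitions q_key sieve_words → Spec_check_partitions q_key sieve_words (check_partitions q_key sieve_words)

-- ===== LEMMAS AND PROOFS =====

-- A's inner break-loop and B's first-match lookup compute the same update
lemma inner_eq (letter : Char) :
    ∀ (gs : List Char) (j : Nat) (res : List Int),
      wsInner letter j gs res =
        (match findZeroSlot letter res (gs.zipIdx j) with
         | none => none
         | some none => some res
         | some (some k) => some (res.set k 1))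
  | [], j, res => by simp [wsInner, findZeroSlot]
  | gl :: rest, j, res => by
    have ih := inner_eq letter rest (j + 1) res
    simp only [List.zipIdx_cons, wsInner, findZeroSlot]
    by_cases h : gl = letter
    · simp only [h, if_true, if_pos]
      cases hres : res[j]? with
      | none => simp
      | some v =>
        by_cases hv : v = 0
        · simp [hv]
        · simp [hv, ih]
    · simp [h, ih]

-- A's explicit outer recursion equals B's foldlM over enumerate(solution)
lemma outer_eq (guess : List Char) :
    ∀ (sol : List Char) (i : Nat) (res : List Int),
      wsOuter guess i sol res = (sol.zipIdx i).foldlM (scoreStep guess) res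
  | [], i, res => by simp [wsOuter]
  | letter :: rest, i, res => by
    simp only [List.zipIdx_cons, List.foldlM_cons, wsOuter, scoreStep]
    cases hg : guess[i]? with
    | none => simp
    | some gi =>
      by_cases h : gi = letter
      · cases hres : res[i]? with
        | none =>
          have hlen : ¬ i < res.length := by
            rw [List.getElem?_eq_none_iff] at hres; omega
          simp [h, hlen]
        | some v =>
          obtain ⟨hlt, -⟩ := List.getElem?_eq_some_iff.mp hres
          simp [h, hlt, outer_eq guess rest (i + 1) (res.set i 2)]
      · rw [inner_eq letter guess 0 res]
        cases hz : findZeroSlot letter res (guess.zipIdx 0) with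
        | none => simp [h]
        | some o =>
          cases o with
          | none => simp [h, outer_eq guess rest (i + 1) res]
          | some k => simp [h, outer_eq guess rest (i + 1) (res.set k 1)]

lemma score_eq (g s : String) : wordl_score g s = wordl_score_b g s := by
  unfold wordl_score wordl_score_b
  rw [outer_eq g.toList s.toList 0 [0, 0, 0, 0, 0]]

-- A-side: the set's foldl-of-add is a sublist of what was folded in
lemma foldl_add_sublist {α : Type} [BEq α] :
    ∀ (xs acc : List α), List.Sublist (xs.foldl PySem.Set.add acc) (acc ++ xs)
  | [], acc => by simp
  | a :: xs, acc => by
    have ih := foldl_add_sublist xs (PySem.Set.add acc a)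
    refine List.Sublist.trans (by simpa using ih) ?_
    unfold PySem.Set.add
    split
    · exact List.Sublist.append_left (List.sublist_cons_self a xs) acc
    · simp

lemma ofList_sublist {α : Type} [BEq α] (xs : List α) :
    List.Sublist (PySem.Set.ofList xs) xs := by
  simpa using foldl_add_sublist xs []

lemma lenEq_iff_nodup (x : List PvRow) :
    x.length = (PySem.Set.ofList x).length ↔ x.Nodup := by
  constructor
  · intro h
    have heq : PySem.Set.ofList x = x :=
      (ofList_sublist x).eq_of_length h.symm
    have := PySem.Set.nodup_ofList x
    rwa [heq] at this
  · intro h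
    rw [PySem.Set.ofList_eq_self_of_nodup x h]

lemma pvToL_injective : Function.Injective pvToL := by
  apply List.map_injective_iff.mpr
  rintro ⟨a1, a2, a3, a4, a5⟩ ⟨b1, b2, b3, b4, b5⟩ h
  simp at h
  obtain ⟨h1, h2, h3, h4, h5⟩ := h
  simp_all

-- B-side: on a list sorted by the key, the adjacent-pair scan decides Nodup
lemma adjDistinct_iff_nodup :
    ∀ (y : List PvRow), y.Pairwise (fun a b => pvToL a ≤ pvToL b) →
      (adjDistinct y = true ↔ y.Nodup)
  | [], _ => by simp [adjDistinct]
  | [a], _ => by simp [adjDistinct]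
  | a :: b :: t, hp => by
    have hab : pvToL a ≤ pvToL b := (List.pairwise_cons.mp hp).1 b (by simp)
    have hpb : (b :: t).Pairwise (fun a b => pvToL a ≤ pvToL b) :=
      (List.pairwise_cons.mp hp).2
    have hbt : ∀ z ∈ t, pvToL b ≤ pvToL z := (List.pairwise_cons.mp hpb).1
    have ih := adjDistinct_iff_nodup (b :: t) hpb
    by_cases h : a = b
    · subst h
      simp [adjDistinct]
    · rw [show adjDistinct (a :: b :: t) = adjDistinct (b :: t) by
        simp [adjDistinct, h], ih]
      constructor
      · intro hn
        rw [List.nodup_cons]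
        refine ⟨?_, hn⟩
        intro hmem
        rcases List.mem_cons.mp hmem with rfl | hmt
        · exact h rfl
        · -- a after b in sorted order, yet a ≤ b: keys equal, so a = b
          have h1 : pvToL a ≤ pvToL b := hab
          have h2 : pvToL b ≤ pvToL a := hbt a hmt
          exact h (pvToL_injective (le_antisymm h1 h2))
      · intro hn
        exact (List.nodup_cons.mp hn).2

lemma check_eq_alt_of_some (x : List PvRow) :
    decide (x.length = (PySem.Set.ofList x).length)
      = adjDistinct (PySem.List.sorted x pvToL false) := by
  have hperm : (PySem.List.sorted x pvToL false).Perm x :=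
    PySem.List.sorted_perm x pvToL false
  have hinst : @PySem.List.sorted PvRow (List (List Int)) List.instLinearOrder.toLT
      LinearOrder.toDecidableLT x pvToL false = PySem.List.sorted x pvToL false := by
    congr 1
  have hsorted : (PySem.List.sorted x pvToL false).Pairwise (fun a b => pvToL a ≤ pvToL b) := by
    rw [← hinst]
    exact PySem.List.sorted_pairwise x pvToL
  have h1 : (adjDistinct (PySem.List.sorted x pvToL false) = true) ↔ x.Nodup :=
    (adjDistinct_iff_nodup _ hsorted).trans hperm.nodup_iff
  rw [← lenEq_iff_nodup] at h1
  by_cases h : x.length = (PySem.Set.ofList x).length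
  · simp [h, h1.mpr h]
  · rw [decide_eq_false h, eq_comm, Bool.eq_false_iff]
    exact fun hc => h (h1.mp hc)

-- the two row builders produce the same Option list
lemma build_eq (q_key : List String) (sieve_words : List String) :
    buildX q_key sieve_words
      = sieve_words.mapM (fun w => q_key.mapM (fun g => wordl_score_b g w)) := by
  unfold buildX scoreRow
  congr 1
  funext w
  congr 1
  funext g
  exact score_eq g w

-- ===== VERDICT (by name: the statement is the Claim_ definition above) =====
theorem check_partitions_spec : Claim_equal_check_partitions := by
  intro q_key sieve_words _ _
  unfold Spec_check_partitions check_partitions check_partitions_alt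
  rw [← build_eq]
  cases buildX q_key sieve_words with
  | none => rfl
  | some x => exact check_eq_alt_of_some x
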